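-- pv_equiv track=rewrite | github.com/subhinone/Smartto_ml | src/step2_prepare_dataset.py | _compute_blink_intervals
-- ===== SOURCE A (Python) =====
-- def _compute_blink_intervals(blink_frames):
--     """눈 감은 구간 사이의 간격(프레임 수) 계산"""
--     intervals = []
--     in_blink = False
--     gap = 0
--     for val in blink_frames:
--         if val:
--             if not in_blink and gap > 0:
--                 intervals.append(gap)
--             in_blink = True
--             gap = 0
--         else:
--             in_blink = False
--             gap += 1
--     return intervals
-- ===== SOURCE B (Python) =====
-- def _compute_blink_intervals(blink_frames):
--     """Run-splitting: repeatedly measure the leading non-blink run of the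
--     remaining suffix, then skip the blink run that ends it, collecting the
--     lengths of gaps that are followed by a blink."""
--     gaps = []
--     i, n = 0, len(blink_frames)
--     while i < n:
--         gap = 0
--         while i + gap < n and not blink_frames[i + gap]:
--             gap += 1
--         i += gap
--         if i == n:
--             break
--         if gap > 0:
--             gaps.append(gap)
--         blink = 0
--         while i + blink < n and blink_frames[i + blink]:
--             blink += 1
--         i += blink
--     return gaps
-- ===== Notes on version B (the rewrite author's own statement) =====
-- stated objective: alternative
-- what changed: Replaced A's single stateful scan (in_blink flag, gap counter, conditional append) with a recursive run-splitting decomposition: count the leading non-blink run, drop it and the blink run that ends it, and recurse, prepending the gap length when positive.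
import Mathlib
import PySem

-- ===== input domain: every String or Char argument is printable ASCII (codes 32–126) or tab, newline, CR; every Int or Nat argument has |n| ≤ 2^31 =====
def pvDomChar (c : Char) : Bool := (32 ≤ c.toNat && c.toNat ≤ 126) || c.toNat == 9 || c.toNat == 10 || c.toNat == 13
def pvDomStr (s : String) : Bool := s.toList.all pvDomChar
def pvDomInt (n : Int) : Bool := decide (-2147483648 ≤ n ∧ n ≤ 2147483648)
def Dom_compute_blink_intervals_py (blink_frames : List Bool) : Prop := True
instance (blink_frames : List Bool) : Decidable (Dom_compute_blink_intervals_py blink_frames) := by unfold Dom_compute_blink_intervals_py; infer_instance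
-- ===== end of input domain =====

-- B replaces A's stateful flag/counter scan by recursive run-splitting; same O(n) cost.

-- ===== PORT A =====
-- the for-loop over (intervals, in_blink, gap), transcribed as structural recursion
def aLoop (intervals : List Int) (in_blink : Bool) (gap : Int) : List Bool → List Int
  | [] => intervals
  | val :: rest =>
    if val then
      aLoop (if !in_blink ∧ gap > 0 then intervals ++ [gap] else intervals) true 0 rest
    else
      aLoop intervals false (gap + 1) rest

def compute_blink_intervals_py (blink_frames : List Bool) : List Int :=
  aLoop [] false 0 blink_frames

-- ===== PORT B =====
-- _count_while: count leading elements satisfying pred (loop with break)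
def countWhile (p : Bool → Bool) : List Bool → Nat
  | [] => 0
  | v :: rest => if p v then countWhile p rest + 1 else 0

-- needed for termination of the port's recursion
theorem countWhile_pos_of_head_true : ∀ (l : List Bool), l.drop (countWhile (fun v => !v) l) ≠ [] →
    1 ≤ countWhile (fun v => !v) l + countWhile id (l.drop (countWhile (fun v => !v) l)) := by
  intro l
  induction l with
  | nil => intro h; simp [countWhile] at h
  | cons v rest ih =>
    intro h
    by_cases hv : v
    · simp [countWhile, hv, id]
    · simp only [countWhile, hv] at h ⊢
      simp only [Bool.not_false, if_true, List.drop_succ_cons] at h ⊢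
      have := ih h
      omega

theorem drop_drop_len_lt (l : List Bool) (h : l.drop (countWhile (fun v => !v) l) ≠ []) :
    ((l.drop (countWhile (fun v => !v) l)).drop (countWhile id (l.drop (countWhile (fun v => !v) l)))).length < l.length := by
  have h1 := countWhile_pos_of_head_true l h
  have h2 : (l.drop (countWhile (fun v => !v) l)).length = l.length - countWhile (fun v => !v) l := by simp
  have h3 : (l.drop (countWhile (fun v => !v) l)).length ≥ 1 := by
    cases hres : l.drop (countWhile (fun v => !v) l) with
    | nil => exact absurd hres h
    | cons a b => simp [hres]
  have h4 : ((l.drop (countWhile (fun v => !v) l)).drop (countWhile id (l.drop (countWhile (fun v => !v) l)))).length = (l.drop (countWhile (fun v => !v) l)).length - countWhile id (l.drop (countWhile (fun v => !v) l)) := by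
    simp [Nat.sub_sub]
  omega

def compute_blink_intervals_py_alt (blink_frames : List Bool) : List Int :=
  let gap := countWhile (fun v => !v) blink_frames
  let rest := blink_frames.drop gap
  if hr : rest = [] then []
  else
    let blink := countWhile id rest
    let tail := compute_blink_intervals_py_alt (rest.drop blink)
    if gap > 0 then (gap : Int) :: tail else tail
termination_by blink_frames.length
decreasing_by
  exact drop_drop_len_lt blink_frames hr

-- ===== PRECONDITION & SPEC =====
def Spec_compute_blink_intervals_py (blink_frames : List Bool) (out : List Int) : Prop := out = compute_blink_intervals_py_alt blink_frames
instance (blink_frames : List Bool) (out : List Int) : Decidable (Spec_compute_blink_intervals_py blink_frames out) := by unfold Spec_compute_blink_intervals_py; infer_instance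

-- ===== CLAIM (what is proved, stated in full; the proofs are below) =====
def Claim_equal_compute_blink_intervals_py : Prop := ∀ (blink_frames : List Bool), Dom_compute_blink_intervals_py blink_frames → Spec_compute_blink_intervals_py blink_frames (compute_blink_intervals_py blink_frames)

-- ===== LEMMAS AND PROOFS =====

theorem head_drop_countWhile : ∀ (l : List Bool) (a : Bool) (r : List Bool),
    l.drop (countWhile (fun v => !v) l) = a :: r → a = true := by
  intro l
  induction l with
  | nil => intro a r h; simp [countWhile] at h
  | cons v rest ih =>
    intro a r h
    by_cases hv : v
    · simp_all [countWhile]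
    · simp only [countWhile, hv] at h
      simp only [Bool.not_false, if_true, List.drop_succ_cons] at h
      exact ih a r h


-- a pure description of A's loop: gapsFrom g l = intervals emitted from state (¬in_blink, gap = g);
-- skipTrues l = intervals emitted from state (in_blink, gap = 0)
mutual
def gapsFrom (g : Int) : List Bool → List Int
  | [] => []
  | true :: rest => (if g > 0 then [g] else []) ++ skipTrues rest
  | false :: rest => gapsFrom (g + 1) rest

def skipTrues : List Bool → List Int
  | [] => []
  | true :: rest => skipTrues rest
  | false :: rest => gapsFrom 1 rest
end

theorem aLoop_eq : ∀ (l : List Bool) (acc : List Int) (g : Int),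
    aLoop acc false g l = acc ++ gapsFrom g l ∧ aLoop acc true 0 l = acc ++ skipTrues l := by
  intro l
  induction l with
  | nil => intro acc g; simp [aLoop, gapsFrom, skipTrues]
  | cons v rest ih =>
    intro acc g
    constructor
    · cases v with
      | true =>
        simp only [aLoop, gapsFrom]
        by_cases hg : g > 0
        · simp only [hg, if_pos, Bool.not_false, true_and]
          rw [(ih (acc ++ [g]) 0).2]
          simp
        · simp only [hg, Bool.not_false, true_and, if_false]
          rw [(ih acc 0).2]
          simp
      | false =>
        simp only [aLoop, gapsFrom]
        exact (ih acc (g + 1)).1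
    · cases v with
      | true =>
        simp only [aLoop, skipTrues]
        have := (ih acc 0).2
        simpa using this
      | false =>
        simp only [aLoop, skipTrues]
        exact (ih acc 1).1

theorem gapsFrom_shift : ∀ (l : List Bool) (g : Int),
    gapsFrom g l = gapsFrom (g + (countWhile (fun v => !v) l : Int)) (l.drop (countWhile (fun v => !v) l)) := by
  intro l
  induction l with
  | nil => intro g; simp [countWhile]
  | cons v rest ih =>
    intro g
    cases v with
    | true => simp [countWhile]
    | false =>
      simp only [countWhile, Bool.not_false, if_true, List.drop_succ_cons, gapsFrom]
      rw [ih (g + 1)]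
      congr 1
      push_cast
      ring

theorem skipTrues_eq_drop : ∀ (l : List Bool),
    skipTrues l = gapsFrom 0 (l.drop (countWhile id l)) := by
  intro l
  induction l with
  | nil => simp [skipTrues, countWhile, gapsFrom]
  | cons v rest ih =>
    cases v with
    | true => simpa [skipTrues, countWhile, id] using ih
    | false => simp [skipTrues, countWhile, id, gapsFrom]

theorem alt_eq_gapsFrom : ∀ (l : List Bool), compute_blink_intervals_py_alt l = gapsFrom 0 l := by
  intro l
  induction hn : l.length using Nat.strong_induction_on generalizing l with
  | _ n ih =>
    subst hn
    rw [compute_blink_intervals_py_alt]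
    simp only []
    set gap := countWhile (fun v => !v) l with hgap
    set rest := l.drop gap with hrest
    by_cases hr : rest = []
    · simp only [hr, dif_pos]
      rw [gapsFrom_shift l 0, ← hgap, ← hrest, hr]
      simp [gapsFrom]
    · simp only [hr, dif_neg, not_false_iff]
      rw [gapsFrom_shift l 0, ← hgap, ← hrest]
      cases hres : rest with
      | nil => exact absurd hres hr
      | cons a r =>
        have ha : a = true := head_drop_countWhile l a r hres
        subst ha
        have hblink : countWhile id (true :: r) = countWhile id r + 1 := by
          simp [countWhile, id]
        have hlen : (List.drop (countWhile id (true :: r)) (true :: r)).length < l.length := by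
          have h := drop_drop_len_lt l hr
          rw [← hgap] at h
          rw [← hrest] at h
          rw [hres] at h
          exact h
        have hrec := ih _ hlen _ rfl
        rw [hrec, hblink]
        simp only [List.drop_succ_cons, gapsFrom, zero_add]
        rw [skipTrues_eq_drop r]
        by_cases hg : gap > 0 <;> simp [hg]

-- ===== VERDICT (by name: the statement is the Claim_ definition above) =====
theorem compute_blink_intervals_py_spec : Claim_equal_compute_blink_intervals_py := by
  intro l _
  unfold Spec_compute_blink_intervals_py compute_blink_intervals_py
  rw [(aLoop_eq l [] 0).1, alt_eq_gapsFrom]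
  simp
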